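-- pv_equiv track=rewrite | github.com/laco/advent-of-code | 2021/day-12/solution.py | _can_we_go
-- ===== SOURCE A (Python) =====
-- from collections import Counter
--
-- def _can_we_go(cave, caves_we_already_visited):
--     if cave == "start":
--         return False
--     elif "end" == caves_we_already_visited[-1]:
--         return False
--     elif (cave not in caves_we_already_visited) or (cave != cave.lower()):
--         return True
--     else: # lower chars
--         _, most_common_count = Counter([c for c in caves_we_already_visited if c == c.lower()]).most_common()[0]
--         if most_common_count <= 1:
--             return True
--         else:
--             return False
-- ===== SOURCE B (Python) =====
-- def _can_we_go(cave, caves_we_already_visited):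
--     if cave == "start":
--         return False
--     if caves_we_already_visited[-1] == "end":
--         return False
--     if cave not in caves_we_already_visited or cave != cave.lower():
--         return True
--     # sort the small caves, then check adjacent pairs: any repeat is adjacent after sorting
--     lows = sorted(c for c in caves_we_already_visited if c == c.lower())
--     for a, b in zip(lows, lows[1:]):
--         if a == b:
--             return False
--     return True
-- ===== Notes on version B (the rewrite author's own statement) =====
-- stated objective: alternative
-- what changed: The Counter frequency table sorted descending by count is replaced by sorting the small-cave names themselves and scanning adjacent pairs for an equal neighbour (a repeat is adjacent after sorting), with no counting at all.
import Mathlib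
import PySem

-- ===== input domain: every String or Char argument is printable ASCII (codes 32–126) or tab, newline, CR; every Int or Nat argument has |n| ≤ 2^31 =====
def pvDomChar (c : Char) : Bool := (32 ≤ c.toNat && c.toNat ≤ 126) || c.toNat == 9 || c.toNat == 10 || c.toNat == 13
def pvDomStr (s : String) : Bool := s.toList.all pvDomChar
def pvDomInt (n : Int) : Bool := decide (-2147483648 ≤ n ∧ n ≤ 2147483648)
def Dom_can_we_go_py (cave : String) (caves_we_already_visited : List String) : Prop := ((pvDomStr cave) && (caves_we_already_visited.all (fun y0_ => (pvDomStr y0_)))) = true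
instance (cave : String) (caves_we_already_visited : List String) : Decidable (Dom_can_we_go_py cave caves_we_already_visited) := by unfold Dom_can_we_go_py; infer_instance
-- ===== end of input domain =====

-- B replaces the Counter/most_common table by sorting the small-cave names and scanning adjacent pairs for a repeat (alternative algorithm, no counting).

-- ===== PORT A =====
def can_we_go_py (cave : String) (caves_we_already_visited : List String) : Bool :=
  if cave == "start" then false
  else
    match PySem.List.pyGet? caves_we_already_visited (-1) with
    | none => false   -- Python raises IndexError here; excluded by Pre_
    | some last =>
      if "end" == last then false
      else if !(caves_we_already_visited.contains cave) || cave != PySem.Str.lower cave then true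
      else
        let lows := caves_we_already_visited.filter (fun c => c == PySem.Str.lower c)
        -- Counter(lows).most_common() = its items sorted by count, descending, stable
        match PySem.List.sorted (PySem.Dict.counter lows).items (fun p => p.2) true with
        | [] => false  -- most_common()[0] would raise IndexError; unreachable in this branch
        | (_, most_common_count) :: _ => if most_common_count ≤ 1 then true else false

-- ===== PORT B =====
-- zip(lows, lows[1:]) scan: false at the first equal adjacent pair
def pvAdjDistinct : List String → Bool
  | [] => true
  | [_] => true
  | a :: b :: rest => if a == b then false else pvAdjDistinct (b :: rest)

def can_we_go_py_alt (cave : String) (caves_we_already_visited : List String) : Bool :=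
  if cave == "start" then false
  else
    match PySem.List.pyGet? caves_we_already_visited (-1) with
    | none => false   -- Python raises IndexError here; excluded by Pre_
    | some last =>
      if last == "end" then false
      else if !(caves_we_already_visited.contains cave) || cave != PySem.Str.lower cave then true
      else
        let lows := PySem.List.sorted
          (caves_we_already_visited.filter (fun c => c == PySem.Str.lower c)) (fun x => x) false
        pvAdjDistinct lows

-- ===== PRECONDITION & SPEC =====
-- Pre_ excludes only the inputs where Python raises IndexError: an empty visited list
-- reached past the first guard (caves_we_already_visited[-1] in both programs).
def Pre_can_we_go_py (cave : String) (caves_we_already_visited : List String) : Prop :=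
  cave = "start" ∨ caves_we_already_visited ≠ []
instance (cave : String) (caves_we_already_visited : List String) : Decidable (Pre_can_we_go_py cave caves_we_already_visited) := by unfold Pre_can_we_go_py; infer_instance
def pvWitness_can_we_go_py : String × List String := ("b", ["start", "A", "b"])

def Spec_can_we_go_py (cave : String) (caves_we_already_visited : List String) (out : Bool) : Prop := out = can_we_go_py_alt cave caves_we_already_visited
instance (cave : String) (caves_we_already_visited : List String) (out : Bool) : Decidable (Spec_can_we_go_py cave caves_we_already_visited out) := by unfold Spec_can_we_go_py; infer_instance

-- ===== CLAIM (what is proved, stated in full; the proofs are below) =====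
def Claim_equal_can_we_go_py : Prop := ∀ (cave : String) (caves_we_already_visited : List String), Dom_can_we_go_py cave caves_we_already_visited → Pre_can_we_go_py cave caves_we_already_visited → Spec_can_we_go_py cave caves_we_already_visited (can_we_go_py cave caves_we_already_visited)

-- ===== LEMMAS AND PROOFS =====

-- on a ≤-sorted list, no equal adjacent pair ↔ no duplicate at all
theorem pvAdjDistinct_of_sorted : ∀ (ys : List String), ys.Pairwise (· ≤ ·) →
    pvAdjDistinct ys = decide ys.Nodup
  | [], _ => by simp [pvAdjDistinct]
  | [a], _ => by simp [pvAdjDistinct]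
  | a :: b :: rest, h => by
    have hc := List.pairwise_cons.mp h
    have hab : a ≤ b := hc.1 b (by simp)
    have ih := pvAdjDistinct_of_sorted (b :: rest) hc.2
    by_cases heq : a = b
    · subst heq
      simp [pvAdjDistinct]
    · have hnotmem : a ∉ b :: rest := by
        intro hmem
        rcases List.mem_cons.mp hmem with h1 | h1
        · exact heq h1
        · have hbx : b ≤ a := (List.pairwise_cons.mp hc.2).1 a h1
          exact heq (le_antisymm hab hbx)
      have hbeq : (a == b) = false := by simp [heq]
      rw [show pvAdjDistinct (a :: b :: rest) = pvAdjDistinct (b :: rest) by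
        simp [pvAdjDistinct, hbeq], ih]
      simp [List.nodup_cons, hnotmem]

theorem pvAdjDistinct_sorted (xs : List String) :
    pvAdjDistinct (PySem.List.sorted xs (fun x => x) false) = decide xs.Nodup := by
  rw [pvAdjDistinct_of_sorted _ (by
    simpa using PySem.List.sorted_pairwise xs (fun x => x))]
  exact decide_eq_decide.mpr
    (List.Perm.nodup_iff (PySem.List.sorted_perm xs (fun x => x) false))

-- A's else branch (head count of most_common ≤ 1) decides exactly Nodup of the lowercase sublist
theorem pvMostCommon_le_one (lows : List String) (hne : lows ≠ []) :
    (match PySem.List.sorted (PySem.Dict.counter lows).items (fun p => p.2) true with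
     | [] => false
     | (_, most_common_count) :: _ => if most_common_count ≤ 1 then true else false) =
      decide lows.Nodup := by
  have hitems : (PySem.Dict.counter lows).items
      = (PySem.Set.ofList lows).map (fun k => (k, (lows.count k : Int))) :=
    PySem.Dict.items_counter lows
  rcases hsort : PySem.List.sorted (PySem.Dict.counter lows).items (fun p : String × Int => p.2) true with _ | ⟨⟨k0, cnt⟩, tl⟩
  · exfalso
    rw [PySem.List.sorted_eq_nil_iff, hitems, List.map_eq_nil_iff] at hsort
    rcases List.exists_mem_of_ne_nil lows hne with ⟨x, hx⟩
    have : x ∈ PySem.Set.ofList lows := (PySem.Set.mem_ofList lows x).mpr hx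
    simp [hsort] at this
  · have hmem : (k0, cnt) ∈ (PySem.Dict.counter lows).items := by
      have hm := (PySem.List.mem_sorted (PySem.Dict.counter lows).items
        (fun p : String × Int => p.2) true (k0, cnt))
      rw [hsort] at hm
      exact hm.mp (by simp)
    rw [hitems] at hmem
    rcases List.mem_map.mp hmem with ⟨k, hk, hkeq⟩
    cases hkeq
    have hkin : k0 ∈ lows := (PySem.Set.mem_ofList lows k0).mp hk
    have hmax : ∀ y ∈ (PySem.Dict.counter lows).items,
        (fun p : String × Int => p.2) y ≤ (lows.count k0 : Int) := by
      intro y hy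
      exact PySem.List.key_head_sorted_rev_ge (PySem.Dict.counter lows).items
        (fun p : String × Int => p.2) hsort y hy
    by_cases hnd : lows.Nodup
    · have hle : List.count k0 lows ≤ 1 := List.nodup_iff_count_le_one.mp hnd k0
      have hleI : ((List.count k0 lows : Int)) ≤ 1 := by exact_mod_cast hle
      simp [hleI, hnd]
    · have hex : ∃ a, 2 ≤ lows.count a := by
        by_contra hno
        simp only [not_exists, not_le] at hno
        exact hnd (List.nodup_iff_count_le_one.mpr (fun a => by have := hno a; omega))
      rcases hex with ⟨a, ha⟩
      have hain : a ∈ lows := List.count_pos_iff.mp (by omega)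
      have hay : (a, (lows.count a : Int)) ∈ (PySem.Dict.counter lows).items := by
        rw [hitems]
        exact List.mem_map.mpr ⟨a, (PySem.Set.mem_ofList lows a).mpr hain, rfl⟩
      have hle := hmax _ hay
      have hle' : lows.count a ≤ lows.count k0 := by simp only at hle; exact_mod_cast hle
      have hgt : 1 < List.count k0 lows := by
        have : 2 ≤ List.count k0 lows := le_trans ha hle'
        omega
      have h2 : ¬ ((List.count k0 lows : Int) ≤ 1) := by exact_mod_cast Nat.not_le.mpr hgt
      simp [h2, hnd]

-- ===== VERDICT (by name: the statement is the Claim_ definition above) =====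
theorem can_we_go_py_spec : Claim_equal_can_we_go_py := by
  intro cave visited _ hpre
  unfold Spec_can_we_go_py can_we_go_py can_we_go_py_alt
  by_cases hstart : (cave == "start") = true
  · simp [hstart]
  · simp only [hstart, Bool.false_eq_true, if_false]
    rcases hget : PySem.List.pyGet? visited (-1) with _ | last
    · rfl
    · simp only
      have hendsym : ("end" == last) = (last == "end") := by
        simp [eq_comm]
      rw [hendsym]
      by_cases hend : (last == "end") = true
      · simp [hend]
      · simp only [hend, Bool.false_eq_true, if_false]
        by_cases hc : visited.contains cave = true
        · by_cases hlow : (cave == PySem.Str.lower cave) = true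
          · have hb : (cave != PySem.Str.lower cave) = false := by simp [bne, hlow]
            simp only [hc, hb, Bool.not_true, Bool.or_false,
              Bool.false_eq_true, if_false]
            have hlne : visited.filter (fun c => c == PySem.Str.lower c) ≠ [] := by
              intro hnil
              have : cave ∈ visited.filter (fun c => c == PySem.Str.lower c) :=
                List.mem_filter.mpr ⟨List.contains_iff_mem.mp hc, hlow⟩
              simp [hnil] at this
            rw [pvMostCommon_le_one _ hlne, pvAdjDistinct_sorted]
          · have hb : (cave != PySem.Str.lower cave) = true := by simp [bne, hlow]
            simp only [hb, Bool.or_true, if_true]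
        · have hcf : visited.contains cave = false := by simpa using hc
          simp only [hcf, Bool.not_false, Bool.true_or, if_true]
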